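-- pv_equiv track=rewrite | github.com/sdodlapa/OmicsOracle | omics_oracle_v2/lib/fulltext/normalizer.py | _build_full_text
-- ===== SOURCE A (Python) =====
-- from typing import Any, Dict, List
--
-- def _build_full_text(title: str, abstract: str, sections: Dict[str, str]) -> str:
--     """
--     Build full text from components.
--
--     Args:
--         title: Paper title
--         abstract: Abstract text
--         sections: Section dict
--
--     Returns:
--         Combined full text
--     """
--     parts = []
--
--     if title:
--         parts.append(title)
--
--     if abstract:
--         parts.append(abstract)
--
--     # Add sections in standard order
--     section_order = ["introduction", "methods", "results", "discussion", "conclusions"]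
--
--     for section_name in section_order:
--         if section_name in sections and sections[section_name]:
--             parts.append(sections[section_name])
--
--     # Add any remaining sections
--     for section_name, section_text in sections.items():
--         if section_name not in section_order and section_text:
--             parts.append(section_text)
--
--     return "\n\n".join(parts)
-- ===== SOURCE B (Python) =====
-- def _build_full_text(title: str, abstract: str, sections: dict) -> str:
--     """Bucket sections by rank in one pass instead of scanning the dict per known name."""
--     section_order = ["introduction", "methods", "results", "discussion", "conclusions"]
--     rank = {name: i for i, name in enumerate(section_order)}
--     sentinel = len(section_order)
--     buckets = [[] for _ in range(sentinel + 1)]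
--     for name, text in sections.items():
--         if text:
--             buckets[rank.get(name, sentinel)].append(text)
--     parts = []
--     if title:
--         parts.append(title)
--     if abstract:
--         parts.append(abstract)
--     for bucket in buckets:
--         parts.extend(bucket)
--     return "\n\n".join(parts)
-- ===== Notes on version B (the rewrite author's own statement) =====
-- stated objective: alternative
-- what changed: Instead of A's per-known-name lookup over the dict followed by a second full membership-checking pass, B makes one pass over the dict, dropping each truthy value into a rank-indexed bucket (unknown names go to a sentinel bucket), then concatenates the buckets.
import Mathlib
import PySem

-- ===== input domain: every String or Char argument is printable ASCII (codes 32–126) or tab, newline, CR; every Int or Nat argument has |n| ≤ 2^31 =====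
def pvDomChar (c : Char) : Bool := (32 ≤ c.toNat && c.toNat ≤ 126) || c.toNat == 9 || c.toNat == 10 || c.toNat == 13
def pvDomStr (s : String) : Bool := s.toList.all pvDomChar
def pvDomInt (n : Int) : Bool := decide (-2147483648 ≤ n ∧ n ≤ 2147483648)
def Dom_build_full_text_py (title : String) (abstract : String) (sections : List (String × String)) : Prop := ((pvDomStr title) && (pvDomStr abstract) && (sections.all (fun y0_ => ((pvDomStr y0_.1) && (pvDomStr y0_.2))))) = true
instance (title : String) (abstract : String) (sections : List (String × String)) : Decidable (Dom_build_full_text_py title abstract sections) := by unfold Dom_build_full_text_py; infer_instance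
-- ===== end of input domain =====

-- B buckets the section values by rank in ONE pass over the dict instead of A's
-- per-known-name lookup pass followed by a second full pass; same return value.

-- ===== PORT A =====
def pvSectionOrder : List String := ["introduction", "methods", "results", "discussion", "conclusions"]

def build_full_text_py (title : String) (abstract : String) (sections : List (String × String)) : String :=
  let parts : List String := []
  let parts := if title != "" then parts ++ [title] else parts
  let parts := if abstract != "" then parts ++ [abstract] else parts
  -- for section_name in section_order: if section_name in sections and sections[section_name]: parts.append(...)
  let parts := pvSectionOrder.foldl (fun ps name =>
    match List.lookup name sections with
    | some v => if v != "" then ps ++ [v] else ps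
    | none => ps) parts
  -- for section_name, section_text in sections.items(): if section_name not in section_order and section_text: ...
  let parts := sections.foldl (fun ps nv =>
    if !(pvSectionOrder.contains nv.1) && (nv.2 != "") then ps ++ [nv.2] else ps) parts
  PySem.Str.join "\n\n" parts

-- ===== PORT B =====
-- rank = {name: i for i, name in enumerate(section_order)}
def pvRank : PySem.Dict String Nat :=
  PySem.Dict.ofList ((PySem.List.enumerate pvSectionOrder).map (fun p => (p.2, p.1.toNat)))  -- indices 0..4 are nonnegative, so Nat is exact

def build_full_text_py_alt (title : String) (abstract : String) (sections : List (String × String)) : String :=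
  let buckets : List (List String) := List.replicate (pvSectionOrder.length + 1) []
  -- for name, text in sections.items(): if text: buckets[rank.get(name, sentinel)].append(text)
  let buckets := sections.foldl (fun bs nv =>
    if nv.2 != "" then
      bs.set (PySem.Dict.getD pvRank nv.1 pvSectionOrder.length)
        (bs.getD (PySem.Dict.getD pvRank nv.1 pvSectionOrder.length) [] ++ [nv.2])
    else bs) buckets
  let parts : List String := []
  let parts := if title != "" then parts ++ [title] else parts
  let parts := if abstract != "" then parts ++ [abstract] else parts
  let parts := buckets.foldl (fun ps b => ps ++ b) parts
  PySem.Str.join "\n\n" parts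

-- ===== PRECONDITION & SPEC =====
-- Pre_ excludes association lists with duplicate section names: a Python dict can never
-- contain a duplicate key, so such lists represent no input the Python functions are called on.
def Pre_build_full_text_py (title : String) (abstract : String) (sections : List (String × String)) : Prop :=
  (sections.map Prod.fst).Nodup
instance (title : String) (abstract : String) (sections : List (String × String)) : Decidable (Pre_build_full_text_py title abstract sections) := by unfold Pre_build_full_text_py; infer_instance

def pvWitness_build_full_text_py : String × String × (List (String × String)) :=
  ("Title", "Abstract", [("methods", "m-text"), ("extra", "e-text"), ("introduction", "")])

def Spec_build_full_text_py (title : String) (abstract : String) (sections : List (String × String)) (out : String) : Prop := out = build_full_text_py_alt title abstract sections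
instance (title : String) (abstract : String) (sections : List (String × String)) (out : String) : Decidable (Spec_build_full_text_py title abstract sections out) := by unfold Spec_build_full_text_py; infer_instance

-- ===== CLAIM (what is proved, stated in full; the proofs are below) =====
def Claim_equal_build_full_text_py : Prop := ∀ (title : String) (abstract : String) (sections : List (String × String)), Dom_build_full_text_py title abstract sections → Pre_build_full_text_py title abstract sections → Spec_build_full_text_py title abstract sections (build_full_text_py title abstract sections)

-- ===== LEMMAS AND PROOFS =====

-- rank.get(name, 5) as a function of the name
def pvRankOf (n : String) : Nat := PySem.Dict.getD pvRank n 5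

set_option maxRecDepth 8192 in
lemma pvRankOf_eq (n : String) : pvRankOf n =
    if n = "introduction" then 0 else if n = "methods" then 1 else if n = "results" then 2
    else if n = "discussion" then 3 else if n = "conclusions" then 4 else 5 := by
  have h : pvRank = PySem.Dict.mk [("introduction", 0), ("methods", 1), ("results", 2), ("discussion", 3), ("conclusions", 4)] := by decide
  simp [pvRankOf, h, PySem.Dict.getD, PySem.Dict.get?, List.find?]
  split_ifs with h1 h2 h3 h4 h5 <;>
    first
      | (subst_vars; rfl)
      | (have b1 : ("introduction" == n) = false := beq_eq_false_iff_ne.mpr (fun e => h1 e.symm)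
         have b2 : ("methods" == n) = false := beq_eq_false_iff_ne.mpr (fun e => h2 e.symm)
         have b3 : ("results" == n) = false := beq_eq_false_iff_ne.mpr (fun e => h3 e.symm)
         have b4 : ("discussion" == n) = false := beq_eq_false_iff_ne.mpr (fun e => h4 e.symm)
         have b5 : ("conclusions" == n) = false := beq_eq_false_iff_ne.mpr (fun e => h5 e.symm)
         rw [b1, b2, b3, b4, b5]; rfl)

-- what loop 1 of A appends for a given known section name
def pvG (sections : List (String × String)) (k : String) : List String :=
  match List.lookup k sections with
  | some v => if v != "" then [v] else []
  | none => []

-- what B's bucket j collects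
def pvContrib (j : Nat) (l : List (String × String)) : List String :=
  (l.filter (fun p => (p.2 != "") && (pvRankOf p.1 == j))).map Prod.snd

lemma pvBucket_fold (l : List (String × String)) (b0 b1 b2 b3 b4 b5 : List String) :
    l.foldl (fun bs nv =>
      if nv.2 != "" then
        bs.set (PySem.Dict.getD pvRank nv.1 pvSectionOrder.length)
          (bs.getD (PySem.Dict.getD pvRank nv.1 pvSectionOrder.length) [] ++ [nv.2])
      else bs) [b0, b1, b2, b3, b4, b5]
    = [b0 ++ pvContrib 0 l, b1 ++ pvContrib 1 l, b2 ++ pvContrib 2 l,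
       b3 ++ pvContrib 3 l, b4 ++ pvContrib 4 l, b5 ++ pvContrib 5 l] := by
  induction l generalizing b0 b1 b2 b3 b4 b5 with
  | nil => simp [pvContrib]
  | cons p l ih =>
    obtain ⟨n, v⟩ := p
    rw [List.foldl_cons]
    by_cases hv : v = ""
    · have hb : (v != "") = false := by simp [hv]
      simp only [hb, Bool.false_eq_true, if_false]
      rw [ih]
      simp [pvContrib, hb]
    · have hb : (v != "") = true := by simp [hv]
      have hgd : ∀ m : String, PySem.Dict.getD pvRank m pvSectionOrder.length = pvRankOf m :=
        fun _ => rfl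
      simp only [hb, if_true, hgd]
      have hr := pvRankOf_eq n
      split_ifs at hr with h1 h2 h3 h4 h5
      · rw [hr]; refine (ih (b0 ++ [v]) b1 b2 b3 b4 b5).trans ?_
        simp [pvContrib, pvRankOf_eq, h1, hb]
      · rw [hr]; refine (ih b0 (b1 ++ [v]) b2 b3 b4 b5).trans ?_
        simp [pvContrib, pvRankOf_eq, h1, h2, hb]
      · rw [hr]; refine (ih b0 b1 (b2 ++ [v]) b3 b4 b5).trans ?_
        simp [pvContrib, pvRankOf_eq, h1, h2, h3, hb]
      · rw [hr]; refine (ih b0 b1 b2 (b3 ++ [v]) b4 b5).trans ?_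
        simp [pvContrib, pvRankOf_eq, h1, h2, h3, h4, hb]
      · rw [hr]; refine (ih b0 b1 b2 b3 (b4 ++ [v]) b5).trans ?_
        simp [pvContrib, pvRankOf_eq, h1, h2, h3, h4, h5, hb]
      · rw [hr]; refine (ih b0 b1 b2 b3 b4 (b5 ++ [v])).trans ?_
        simp [pvContrib, pvRankOf_eq, h1, h2, h3, h4, h5, hb]

lemma pvFilter_nil_of_not_mem (l : List (String × String)) (k : String)
    (h : k ∉ l.map Prod.fst) :
    (l.filter (fun p => (p.2 != "") && (p.1 == k))).map Prod.snd = [] := by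
  induction l with
  | nil => rfl
  | cons p l ih =>
    simp only [List.map_cons, List.mem_cons] at h
    push_neg at h
    rw [List.filter_cons]
    have : (p.1 == k) = false := beq_eq_false_iff_ne.mpr (Ne.symm h.1)
    simp only [this, Bool.and_false, Bool.false_eq_true, if_false]
    exact ih h.2

lemma pvLookup_filter (sections : List (String × String)) (k : String)
    (hnd : (sections.map Prod.fst).Nodup) :
    (sections.filter (fun p => (p.2 != "") && (p.1 == k))).map Prod.snd = pvG sections k := by
  induction sections with
  | nil => rfl
  | cons p l ih =>
    rw [List.map_cons, List.nodup_cons] at hnd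
    rw [List.filter_cons]
    by_cases hk : p.1 = k
    · have hb : (p.1 == k) = true := beq_iff_eq.mpr hk
      have hnil := pvFilter_nil_of_not_mem l k (hk ▸ hnd.1)
      by_cases hv : (p.2 != "") = true
      · simp only [hb, hv, Bool.and_true, Bool.true_and, if_true]
        simp [pvG, List.lookup, hk, hb, hv, hnil]
      · simp only [hb, Bool.and_true, hv]
        simp only [Bool.not_eq_true] at hv
        simp [pvG, List.lookup, hk, hb, hv, hnil]
    · have hb : (p.1 == k) = false := beq_eq_false_iff_ne.mpr hk
      simp only [hb, Bool.and_false, Bool.false_eq_true, if_false]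
      rw [ih hnd.2]
      have : (k == p.1) = false := beq_eq_false_iff_ne.mpr (fun e => hk e.symm)
      simp [pvG, List.lookup, this]

lemma pvRankOf_beq_0 (n : String) : (pvRankOf n == 0) = (n == "introduction") := by
  rw [pvRankOf_eq]; split_ifs <;> simp_all [beq_iff_eq]
lemma pvRankOf_beq_1 (n : String) : (pvRankOf n == 1) = (n == "methods") := by
  rw [pvRankOf_eq]; split_ifs <;> simp_all [beq_iff_eq]
lemma pvRankOf_beq_2 (n : String) : (pvRankOf n == 2) = (n == "results") := by
  rw [pvRankOf_eq]; split_ifs <;> simp_all [beq_iff_eq]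
lemma pvRankOf_beq_3 (n : String) : (pvRankOf n == 3) = (n == "discussion") := by
  rw [pvRankOf_eq]; split_ifs <;> simp_all [beq_iff_eq]
lemma pvRankOf_beq_4 (n : String) : (pvRankOf n == 4) = (n == "conclusions") := by
  rw [pvRankOf_eq]; split_ifs <;> simp_all [beq_iff_eq]
lemma pvRankOf_beq_5 (n : String) : (pvRankOf n == 5) = !(pvSectionOrder.contains n) := by
  rw [pvRankOf_eq]; split_ifs <;> simp_all [pvSectionOrder, beq_iff_eq, eq_comm]

lemma pvContrib_known (sections : List (String × String)) (k : String) (j : Nat)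
    (hnd : (sections.map Prod.fst).Nodup)
    (hrk : ∀ n : String, (pvRankOf n == j) = (n == k)) :
    pvContrib j sections = pvG sections k := by
  unfold pvContrib
  rw [List.filter_congr (fun p _ => by rw [hrk p.1])]
  exact pvLookup_filter sections k hnd

lemma pvContrib_unknown (sections : List (String × String)) :
    pvContrib 5 sections
    = (sections.filter (fun nv => !(pvSectionOrder.contains nv.1) && (nv.2 != ""))).map Prod.snd := by
  unfold pvContrib
  rw [List.filter_congr (fun p _ => by rw [pvRankOf_beq_5 p.1, Bool.and_comm])]

lemma pvAstep (sections : List (String × String)) (ps : List String) (k : String) :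
    (match List.lookup k sections with
     | some v => if v != "" then ps ++ [v] else ps
     | none => ps) = ps ++ pvG sections k := by
  unfold pvG
  rcases List.lookup k sections with _ | v
  · simp
  · by_cases hv : (v != "") = true <;> simp [hv]

-- ===== VERDICT (by name: the statement is the Claim_ definition above) =====
theorem build_full_text_py_spec : Claim_equal_build_full_text_py := by
  intro title abstract sections _ hpre
  unfold Spec_build_full_text_py
  simp only [build_full_text_py, build_full_text_py_alt]
  rw [show (List.replicate (pvSectionOrder.length + 1) ([] : List String))
        = [[], [], [], [], [], []] from rfl]
  rw [pvBucket_fold]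
  rw [PySem.List.foldl_append_if
        (fun nv => !(pvSectionOrder.contains nv.1) && (nv.2 != "")) (fun nv => nv.2) sections]
  congr 1
  simp only [pvSectionOrder, List.foldl_cons, List.foldl_nil]
  simp only [pvAstep sections]
  rw [pvContrib_known sections "introduction" 0 hpre pvRankOf_beq_0,
      pvContrib_known sections "methods" 1 hpre pvRankOf_beq_1,
      pvContrib_known sections "results" 2 hpre pvRankOf_beq_2,
      pvContrib_known sections "discussion" 3 hpre pvRankOf_beq_3,
      pvContrib_known sections "conclusions" 4 hpre pvRankOf_beq_4,
      pvContrib_unknown sections]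
  simp [pvSectionOrder, List.append_assoc, Bool.and_assoc]
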